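-- pv_equiv track=rewrite | github.com/alihejazi97/scraping_utility | scrape_utility copy.py | divide_subtitle_list
-- ===== SOURCE A (Python) =====
-- def divide_subtitle_list(subtitle_list, continous_list):
--     _subtitle_division_list = []
--     _division = []
--     assert len(continous_list) + 1 == len(subtitle_list)
--     for _subtitle, _is_continous in zip(subtitle_list, [True] + continous_list):
--         if _division and (not _is_continous):
--             _subtitle_division_list.append(_division)
--             _division = []
--         _division.append(_subtitle)
--     if _division:
--         _subtitle_division_list.append(_division)
--     return _subtitle_division_list
-- ===== SOURCE B (Python) =====
-- def divide_subtitle_list(subtitle_list, continous_list):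
--     assert len(continous_list) + 1 == len(subtitle_list)
--     bounds = [0] + [i + 1 for i, c in enumerate(continous_list) if not c] + [len(subtitle_list)]
--     return [subtitle_list[a:b] for a, b in zip(bounds, bounds[1:])]
-- ===== Notes on version B (the rewrite author's own statement) =====
-- stated objective: alternative
-- what changed: Replaces A's single stateful pass with accumulator/flush by a two-phase boundary decomposition: first collect split indices from the continuity list, then slice the subtitle list between consecutive boundaries.
import Mathlib
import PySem

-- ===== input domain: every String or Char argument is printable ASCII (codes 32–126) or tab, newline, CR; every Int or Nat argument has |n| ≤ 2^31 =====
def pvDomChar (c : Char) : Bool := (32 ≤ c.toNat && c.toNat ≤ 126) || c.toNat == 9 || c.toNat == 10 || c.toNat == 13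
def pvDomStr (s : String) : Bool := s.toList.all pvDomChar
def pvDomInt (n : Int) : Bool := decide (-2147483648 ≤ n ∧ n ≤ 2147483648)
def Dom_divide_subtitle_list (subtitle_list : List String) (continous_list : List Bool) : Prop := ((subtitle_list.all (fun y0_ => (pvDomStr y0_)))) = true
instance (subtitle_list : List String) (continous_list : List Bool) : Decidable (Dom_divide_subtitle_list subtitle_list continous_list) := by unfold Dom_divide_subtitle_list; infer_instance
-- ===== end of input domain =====

-- B replaces A's single stateful accumulate-and-flush pass by a boundary decomposition
-- (collect split indices first, then slice between consecutive boundaries); same O(n) cost.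

-- ===== PORT A =====
-- loop body: if _division and (not _is_continous): flush; then _division.append(_subtitle)
def aStep (st : List (List String) × List String) (sc : String × Bool) : List (List String) × List String :=
  if st.2 ≠ [] ∧ sc.2 = false then (st.1 ++ [st.2], [sc.1]) else (st.1, st.2 ++ [sc.1])

-- the assert is Pre_divide_subtitle_list; the loop over zip(subtitle_list, [True]+continous_list) is the foldl
def divide_subtitle_list (subtitle_list : List String) (continous_list : List Bool) : List (List String) :=
  let st := (subtitle_list.zip (true :: continous_list)).foldl aStep ([], [])
  if st.2 ≠ [] then st.1 ++ [st.2] else st.1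

-- ===== PORT B =====
-- [i + 1 for i, c in enumerate(continous_list) if not c]
def pvFalseBounds (continous_list : List Bool) : List Int :=
  ((PySem.List.enumerate continous_list).filter (fun ic => !ic.2)).map (fun ic => ic.1 + 1)

-- [subtitle_list[a:b] for a, b in zip(bounds, bounds[1:])]
def divide_subtitle_list_alt (subtitle_list : List String) (continous_list : List Bool) : List (List String) :=
  let bounds : List Int := 0 :: (pvFalseBounds continous_list ++ [(subtitle_list.length : Int)])
  (bounds.zip bounds.tail).map (fun ab => PySem.List.slice subtitle_list (some ab.1) (some ab.2))

-- ===== PRECONDITION & SPEC =====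
-- exactly the assert in A: len(continous_list) + 1 == len(subtitle_list); A raises AssertionError otherwise
def Pre_divide_subtitle_list (subtitle_list : List String) (continous_list : List Bool) : Prop :=
  continous_list.length + 1 = subtitle_list.length
instance (subtitle_list : List String) (continous_list : List Bool) : Decidable (Pre_divide_subtitle_list subtitle_list continous_list) := by unfold Pre_divide_subtitle_list; infer_instance
def pvWitness_divide_subtitle_list : List String × List Bool := (["a", "b", "c"], [true, false])

def Spec_divide_subtitle_list (subtitle_list : List String) (continous_list : List Bool) (out : List (List String)) : Prop := out = divide_subtitle_list_alt subtitle_list continous_list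
instance (subtitle_list : List String) (continous_list : List Bool) (out : List (List String)) : Decidable (Spec_divide_subtitle_list subtitle_list continous_list out) := by unfold Spec_divide_subtitle_list; infer_instance

-- ===== CLAIM (what is proved, stated in full; the proofs are below) =====
def Claim_equal_divide_subtitle_list : Prop := ∀ (subtitle_list : List String) (continous_list : List Bool), Dom_divide_subtitle_list subtitle_list continous_list → Pre_divide_subtitle_list subtitle_list continous_list → Spec_divide_subtitle_list subtitle_list continous_list (divide_subtitle_list subtitle_list continous_list)

-- ===== LEMMAS AND PROOFS =====

/-- Common reference: `ref2 xs cs = (rest of the currently open group, remaining groups)`. -/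
def ref2 : List String → List Bool → List String × List (List String)
  | [], _ => ([], [])
  | _ :: _, [] => ([], [])
  | s :: ss, c :: cs =>
    let r := ref2 ss cs
    if c then (s :: r.1, r.2) else ([], (s :: r.1) :: r.2)

-- ---- A-side ----

lemma aStep_true (acc : List (List String)) (d : List String) (s : String) :
    aStep (acc, d) (s, true) = (acc, d ++ [s]) := by simp [aStep]

lemma aStep_false (acc : List (List String)) (d : List String) (s : String) (hd : d ≠ []) :
    aStep (acc, d) (s, false) = (acc ++ [d], [s]) := by simp [aStep, hd]

lemma A_loop (cs : List Bool) : ∀ (xs : List String) (acc : List (List String)) (d : List String),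
    xs.length = cs.length → d ≠ [] →
    ((xs.zip cs).foldl aStep (acc, d)).2 ≠ [] ∧
      ((xs.zip cs).foldl aStep (acc, d)).1 ++ [((xs.zip cs).foldl aStep (acc, d)).2]
        = acc ++ (d ++ (ref2 xs cs).1) :: (ref2 xs cs).2 := by
  induction cs with
  | nil =>
    intro xs acc d hlen hd
    have hxs : xs = [] := List.length_eq_zero_iff.mp hlen
    subst hxs
    simp [ref2, hd]
  | cons c cs ih =>
    intro xs acc d hlen hd
    match xs with
    | [] => simp at hlen
    | s :: ss =>
      have hlen' : ss.length = cs.length := by simpa using hlen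
      cases c with
      | true =>
        rw [List.zip_cons_cons, List.foldl_cons, aStep_true]
        have h := ih ss acc (d ++ [s]) hlen' (by simp)
        refine ⟨h.1, ?_⟩
        rw [h.2]
        simp [ref2]
      | false =>
        rw [List.zip_cons_cons, List.foldl_cons, aStep_false _ _ _ hd]
        have h := ih ss (acc ++ [d]) [s] hlen' (by simp)
        refine ⟨h.1, ?_⟩
        rw [h.2]
        simp [ref2]

lemma A_eq_ref (x : String) (xs : List String) (cs : List Bool) (hlen : xs.length = cs.length) :
    divide_subtitle_list (x :: xs) cs = (x :: (ref2 xs cs).1) :: (ref2 xs cs).2 := by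
  have hstep : aStep ([], []) (x, true) = ([], [x]) := by simp [aStep]
  have h := A_loop cs xs [] [x] hlen (by simp)
  show (let st := ((x :: xs).zip (true :: cs)).foldl aStep ([], []);
        if st.2 ≠ [] then st.1 ++ [st.2] else st.1) = _
  rw [List.zip_cons_cons, List.foldl_cons, hstep]
  simp only
  rw [if_pos h.1, h.2]
  simp

-- ---- B-side ----

/-- Groups cut from `subs` at consecutive members of `0 :: L`. -/
def sliceGroups (subs : List String) (L : List Int) : List (List String) :=
  ((((0 : Int) :: L).zip L).map (fun ab => PySem.List.slice subs (some ab.1) (some ab.2)))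

lemma alt_def (subs : List String) (cont : List Bool) :
    divide_subtitle_list_alt subs cont
      = sliceGroups subs (pvFalseBounds cont ++ [(subs.length : Int)]) := rfl

lemma slice_succ (x : String) (xs : List String) (a b : Int) (ha : 0 ≤ a) (hb : 0 ≤ b) :
    PySem.List.slice (x :: xs) (some (a + 1)) (some (b + 1)) = PySem.List.slice xs (some a) (some b) := by
  rw [PySem.List.slice_toNat (x :: xs) (by omega) (by omega), PySem.List.slice_toNat xs ha hb,
    show (a + 1).toNat = a.toNat + 1 by omega,
    show (b + 1).toNat - (a.toNat + 1) = b.toNat - a.toNat by omega, List.drop_succ_cons]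

lemma slice_zero_succ (x : String) (xs : List String) (b : Int) (hb : 0 ≤ b) :
    PySem.List.slice (x :: xs) (some 0) (some (b + 1)) = x :: PySem.List.slice xs (some 0) (some b) := by
  rw [PySem.List.slice_toNat (x :: xs) le_rfl (by omega), PySem.List.slice_toNat xs le_rfl hb]
  have h1 : (b + 1).toNat = b.toNat + 1 := by omega
  simp [h1]

lemma shift_slices (x : String) (xs : List String) (P : List (Int × Int))
    (h : ∀ p ∈ P, 0 ≤ p.1 ∧ 0 ≤ p.2) :
    (P.map (fun p => ((p.1 + 1 : Int), (p.2 + 1 : Int)))).map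
        (fun ab => PySem.List.slice (x :: xs) (some ab.1) (some ab.2))
      = P.map (fun ab => PySem.List.slice xs (some ab.1) (some ab.2)) := by
  rw [List.map_map]
  apply List.map_congr_left
  intro p hp
  exact slice_succ x xs p.1 p.2 (h p hp).1 (h p hp).2

lemma zip_tail_map_succ (L : List Int) :
    ((L.map (· + 1)).zip (L.map (· + 1)).tail)
      = (L.zip L.tail).map (fun p => ((p.1 + 1 : Int), (p.2 + 1 : Int))) := by
  rw [← List.map_tail, List.zip_map]
  rfl

lemma zip_mem_nonneg (L : List Int) (h : ∀ a ∈ L, 0 ≤ a) :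
    ∀ p ∈ L.zip L.tail, 0 ≤ p.1 ∧ 0 ≤ p.2 := by
  intro p hp
  have := List.of_mem_zip hp
  exact ⟨h p.1 this.1, h p.2 (List.mem_of_mem_tail this.2)⟩

lemma glue_true (x : String) (xs : List String) (L : List Int) (h0 : ∀ a ∈ L, 0 ≤ a) :
    sliceGroups (x :: xs) (L.map (· + 1))
      = (match sliceGroups xs L with
          | [] => []
          | g :: gs => (x :: g) :: gs) := by
  match L with
  | [] => simp [sliceGroups]
  | l0 :: L' =>
    have hl0 : 0 ≤ l0 := h0 l0 (by simp)
    simp only [sliceGroups, List.map_cons, List.zip_cons_cons]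
    rw [slice_zero_succ x xs l0 hl0]
    congr 1
    have h1 : (((l0 + 1) :: L'.map (· + 1)).zip (L'.map (· + 1)))
        = (((l0 :: L').map (· + 1)).zip (((l0 :: L').map (· + 1)).tail)) := by simp
    rw [h1, zip_tail_map_succ, shift_slices x xs _ (zip_mem_nonneg _ h0)]
    rfl

lemma glue_false (x : String) (xs : List String) (L : List Int) (h0 : ∀ a ∈ L, 0 ≤ a) :
    sliceGroups (x :: xs) ((1 : Int) :: L.map (· + 1)) = [x] :: sliceGroups xs L := by
  simp only [sliceGroups, List.zip_cons_cons, List.map_cons]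
  have hhead : PySem.List.slice (x :: xs) (some 0) (some 1) = [x] := by
    rw [show (1 : Int) = (0 : Int) + 1 by norm_num, slice_zero_succ x xs 0 le_rfl,
      PySem.List.slice_toNat xs le_rfl le_rfl]
    simp
  rw [hhead]
  congr 1
  have h1 : (((1 : Int) :: L.map (· + 1)).zip (L.map (· + 1)))
      = ((((0 : Int) :: L).map (· + 1)).zip ((((0 : Int) :: L).map (· + 1)).tail)) := by simp
  have h2 : ∀ a ∈ (0 : Int) :: L, 0 ≤ a := by
    intro a ha
    rcases List.mem_cons.mp ha with h | h
    · omega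
    · exact h0 a h
  rw [h1, zip_tail_map_succ, shift_slices x xs _ (zip_mem_nonneg _ h2)]
  rfl

lemma enumerate_shift {α : Type} (xs : List α) : ∀ (s : Int),
    PySem.List.enumerate xs (s + 1) = (PySem.List.enumerate xs s).map (fun p => (p.1 + 1, p.2)) := by
  induction xs with
  | nil => intro s; simp [PySem.List.enumerate_nil]
  | cons x xs ih =>
    intro s
    rw [PySem.List.enumerate_cons, PySem.List.enumerate_cons, List.map_cons, ih (s + 1)]

lemma fb_cons (c : Bool) (cs : List Bool) :
    pvFalseBounds (c :: cs) = (if c then [] else [(1 : Int)]) ++ (pvFalseBounds cs).map (· + 1) := by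
  have key : ∀ (E : List (Int × Bool)),
      (((E.map (fun p => ((p.1 + 1 : Int), p.2))).filter (fun ic => !ic.2)).map (fun ic => ic.1 + 1))
        = ((E.filter (fun ic => !ic.2)).map (fun ic => ic.1 + 1)).map (· + 1) := by
    intro E
    rw [List.filter_map, List.map_map, List.map_map]
    apply List.map_congr_left
    intro p _
    simp [Function.comp]
  unfold pvFalseBounds
  rw [PySem.List.enumerate_cons, enumerate_shift cs 0, List.filter_cons]
  cases c with
  | true =>
    rw [if_neg (by simp), key]
    simp
  | false =>
    rw [if_pos (by simp), List.map_cons, key]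
    simp

lemma fb_nonneg (cs : List Bool) : ∀ a ∈ pvFalseBounds cs, 0 ≤ a := by
  intro a ha
  unfold pvFalseBounds at ha
  rcases List.mem_map.mp ha with ⟨p, hp, rfl⟩
  have hp' := List.mem_filter.mp hp
  rcases (PySem.List.mem_enumerate_iff cs 0 p).mp hp'.1 with ⟨k, hk, rfl⟩
  simp only
  omega

lemma B_eq_ref (cs : List Bool) : ∀ (x : String) (xs : List String), xs.length = cs.length →
    divide_subtitle_list_alt (x :: xs) cs = (x :: (ref2 xs cs).1) :: (ref2 xs cs).2 := by
  induction cs with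
  | nil =>
    intro x xs hlen
    have hxs : xs = [] := List.length_eq_zero_iff.mp hlen
    subst hxs
    rw [alt_def]
    simp only [pvFalseBounds, PySem.List.enumerate_nil, List.filter_nil, List.map_nil,
      List.nil_append, List.length_cons, List.length_nil, sliceGroups, List.zip_cons_cons,
      List.zip_nil_right, List.map_cons, List.map_nil, ref2]
    rw [PySem.List.slice_toNat [x] le_rfl (by omega)]
    simp
  | cons c cs ih =>
    intro x xs hlen
    match xs with
    | [] => simp at hlen
    | s :: ss =>
      have hlen' : ss.length = cs.length := by simpa using hlen
      set L : List Int := pvFalseBounds cs ++ [((ss.length : Int) + 1)] with hL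
      have hLnn : ∀ a ∈ L, 0 ≤ a := by
        intro a ha
        rcases List.mem_append.mp ha with h | h
        · exact fb_nonneg cs a h
        · simp at h; omega
      have hB' : sliceGroups (s :: ss) L = (s :: (ref2 ss cs).1) :: (ref2 ss cs).2 := by
        have := ih s ss hlen'
        rw [alt_def] at this
        have hcast : ((((s :: ss).length : Nat) : Int)) = (ss.length : Int) + 1 := by
          simp
        rw [hcast] at this
        exact this
      have hnum : (((x :: s :: ss).length : Nat) : Int) = ((ss.length : Int) + 1) + 1 := by
        simp only [List.length_cons]
        push_cast
        ring
      cases c with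
      | true =>
        rw [alt_def]
        have hbounds : pvFalseBounds (true :: cs) ++ [(((x :: s :: ss).length : Nat) : Int)]
            = L.map (· + 1) := by
          rw [fb_cons, hnum, hL]
          simp
        rw [hbounds, glue_true x (s :: ss) L hLnn, hB']
        simp [ref2]
      | false =>
        rw [alt_def]
        have hbounds : pvFalseBounds (false :: cs) ++ [(((x :: s :: ss).length : Nat) : Int)]
            = (1 : Int) :: L.map (· + 1) := by
          rw [fb_cons, hnum, hL]
          simp
        rw [hbounds, glue_false x (s :: ss) L hLnn, hB']
        simp [ref2]

-- ===== VERDICT (by name: the statement is the Claim_ definition above) =====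
theorem divide_subtitle_list_spec : Claim_equal_divide_subtitle_list := by
  intro subs cont _ hpre
  unfold Spec_divide_subtitle_list
  match subs with
  | [] => exact absurd hpre (by simp [Pre_divide_subtitle_list])
  | x :: xs =>
    have hlen : xs.length = cont.length := by
      simp only [Pre_divide_subtitle_list, List.length_cons] at hpre
      omega
    rw [A_eq_ref x xs cont hlen, B_eq_ref cont x xs hlen]
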